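-- pv_equiv track=rewrite | github.com/haochengxia/ZJU_3_2-Cryptography | pyrsa/rsa.py | list_all_ed
-- ===== SOURCE A (Python) =====
-- def list_all_ed(p, q):
--     ed_list = []
--     m = _euler(p, q)
--     for i in range(2, m):
--         if _check_relatively_prime(i, m):
--             e = i
--             d = _module_reverse(e, m)
--             ed = [e,d]
--             ed_list.append(ed)
--     return ed_list
--
-- def _euler(p, q):
--     _euler_n = (p - 1) * (q - 1)
--     return _euler_n
--
-- def _check_relatively_prime(a, b):
--     """
--     使用辗转相除法确定最大公约数，进行互质判断
--     """
--     if _gcd(a, b) == 1: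
--         return True
--     else:
--         return False
--
-- def _gcd(a, b):
--     """
--     辗转相除法返回最大公约数
--     """
--     if a > b:
--         a = a + b
--         b = a - b
--         a = a - b
--     _res = a % b
--     while _res != 0:
--         a = b
--         b = _res
--         _res = a % b
--     return b
--
-- def _module_reverse(e, m):
--     """
--     取模反 (e*d) = 1 mod Euler(n)
--     """
--     _mod_rev = 0
--     for i in range(2, m):
--         if (i * e) % m == 1:
--             _mod_rev = i
--     return _mod_rev
-- ===== SOURCE B (Python) =====
-- def list_all_ed(p, q):
--     m = (p - 1) * (q - 1)
--     ed_list = []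
--     for e in range(2, m):
--         d = _ext_inverse(e, m)
--         if d is not None:
--             ed_list.append([e, d])
--     return ed_list
--
--
-- def _ext_inverse(e, m):
--     """Extended Euclidean algorithm: return the inverse of e modulo m
--     (in range [0, m)), or None if gcd(e, m) != 1."""
--     old_r, r = e, m
--     old_s, s = 1, 0
--     while r != 0:
--         qq = old_r // r
--         old_r, r = r, old_r - qq * r
--         old_s, s = s, old_s - qq * s
--     if old_r != 1:
--         return None
--     return old_s % m
-- ===== Notes on version B (the rewrite author's own statement) =====
-- stated objective: faster
-- what changed: B computes each modular inverse with one extended-Euclidean pass (which also decides coprimality), replacing A's separate gcd check plus a full linear scan of range(2,m) per candidate e.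
import Mathlib
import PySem

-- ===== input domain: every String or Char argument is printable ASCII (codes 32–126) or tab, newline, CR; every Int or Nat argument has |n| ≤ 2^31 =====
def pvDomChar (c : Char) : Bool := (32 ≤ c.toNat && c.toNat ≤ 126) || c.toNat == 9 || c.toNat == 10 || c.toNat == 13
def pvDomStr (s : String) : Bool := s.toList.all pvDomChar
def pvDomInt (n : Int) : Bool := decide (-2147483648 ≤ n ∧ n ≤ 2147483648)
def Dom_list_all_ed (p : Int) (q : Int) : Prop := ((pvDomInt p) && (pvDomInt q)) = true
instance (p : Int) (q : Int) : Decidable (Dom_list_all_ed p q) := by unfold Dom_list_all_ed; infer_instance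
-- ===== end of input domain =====

-- B replaces A's per-candidate gcd check plus linear scan for the modular inverse by a single
-- extended-Euclidean pass per candidate (objective: faster; measured).


-- ===== PORT A =====
-- _gcd's while loop: while _res != 0: a = b; b = _res; _res = a % b   -- then return b
def pvGcdLoop (b res : Int) : Int :=
  if h : res = 0 then b
  else pvGcdLoop res (PySem.Int.mod b res)
termination_by res.natAbs
decreasing_by
  rcases lt_trichotomy res 0 with h1 | h1 | h1
  · have := PySem.Int.mod_neg_bounds b h1; omega
  · exact absurd h1 h
  · have := PySem.Int.mod_nonneg b h1
    have := PySem.Int.mod_lt b h1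
    omega

-- _gcd: the three assignments 'a = a+b; b = a-b; a = a-b' swap a and b
def pvGcd (a b : Int) : Int :=
  let ab := if a > b then (b, a) else (a, b)
  pvGcdLoop ab.2 (PySem.Int.mod ab.1 ab.2)

def pvCheckRelativelyPrime (a b : Int) : Bool :=
  if pvGcd a b = 1 then true else false

-- _module_reverse: keeps the LAST i in range(2, m) with (i*e) % m == 1, default 0
def pvModuleReverse (e m : Int) : Int :=
  (PySem.List.pyRange 2 m 1).foldl
    (fun modRev i => if PySem.Int.mod (i * e) m = 1 then i else modRev) 0

def list_all_ed (p : Int) (q : Int) : List (List Int) :=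
  let m := (p - 1) * (q - 1)
  (PySem.List.pyRange 2 m 1).foldl
    (fun edList i =>
      if pvCheckRelativelyPrime i m then edList ++ [[i, pvModuleReverse i m]]
      else edList) []

-- ===== PORT B =====
-- _ext_inverse's while loop: while r != 0: qq = old_r // r; old_r, r = r, old_r - qq*r; old_s, s = s, old_s - qq*s
def pvExtLoop (oldr r olds s : Int) : Int × Int :=
  if h : r = 0 then (oldr, olds)
  else
    let qq := PySem.Int.floordiv oldr r
    pvExtLoop r (oldr - qq * r) s (olds - qq * s)
termination_by r.natAbs
decreasing_by
  have hm : oldr - PySem.Int.floordiv oldr r * r = PySem.Int.mod oldr r := by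
    have := PySem.Int.floordiv_mul_add_mod oldr r; omega
  rw [hm]
  rcases lt_trichotomy r 0 with h1 | h1 | h1
  · have := PySem.Int.mod_neg_bounds oldr h1; omega
  · exact absurd h1 h
  · have := PySem.Int.mod_nonneg oldr h1
    have := PySem.Int.mod_lt oldr h1
    omega

def pvExtInverse (e m : Int) : Option Int :=
  let gs := pvExtLoop e m 1 0
  if gs.1 ≠ 1 then none else some (PySem.Int.mod gs.2 m)

def list_all_ed_alt (p : Int) (q : Int) : List (List Int) :=
  let m := (p - 1) * (q - 1)
  (PySem.List.pyRange 2 m 1).foldl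
    (fun edList e =>
      match pvExtInverse e m with
      | none => edList
      | some d => edList ++ [[e, d]]) []

-- ===== PRECONDITION & SPEC =====
def Spec_list_all_ed (p : Int) (q : Int) (out : List (List Int)) : Prop := out = list_all_ed_alt p q
instance (p : Int) (q : Int) (out : List (List Int)) : Decidable (Spec_list_all_ed p q out) := by unfold Spec_list_all_ed; infer_instance

-- ===== CLAIM (what is proved, stated in full; the proofs are below) =====
def Claim_equal_list_all_ed : Prop := ∀ (p : Int) (q : Int), Dom_list_all_ed p q → Spec_list_all_ed p q (list_all_ed p q)

-- ===== LEMMAS AND PROOFS =====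

-- one Euclidean step on nonnegative arguments preserves Int.gcd
theorem pv_gcd_step (b res : Int) (hb : 0 ≤ b) (hres : 0 < res) :
    Int.gcd res (b % res) = Int.gcd b res := by
  obtain ⟨bn, rfl⟩ := Int.eq_ofNat_of_zero_le hb
  obtain ⟨rn, rfl⟩ := Int.eq_ofNat_of_zero_le hres.le
  rw [show ((bn : Int) % (rn : Int)) = ((bn % rn : Nat) : Int) from (Int.natCast_mod bn rn).symm]
  simp only [Int.gcd, Int.natAbs_natCast]
  rw [Nat.gcd_comm rn (bn % rn), ← Nat.gcd_rec rn bn, Nat.gcd_comm]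

-- a multiple of m strictly between -m and m is 0
theorem pv_dvd_small_zero (x m : Int) (h : m ∣ x) (h2 : -m < x) (h3 : x < m) : x = 0 := by
  rcases h with ⟨k, rfl⟩
  rcases lt_trichotomy k 0 with hk | hk | hk
  · nlinarith
  · simp [hk]
  · nlinarith

-- m ∣ a - 1 and 1 < m give a % m = 1
theorem pv_emod_one_of_dvd (a m : Int) (h : m ∣ a - 1) (hm : 1 < m) : a % m = 1 := by
  have h1 : (1:Int) % m = 1 := Int.emod_eq_of_lt (by omega) (by omega)
  have h2 : a ≡ 1 [ZMOD m] := (Int.modEq_iff_dvd.mpr h).symm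
  simpa [Int.ModEq, h1] using h2

-- A's gcd loop computes Int.gcd
theorem pvGcdLoop_eq (b res : Int) (hb : 0 < b) (hres : 0 ≤ res) :
    pvGcdLoop b res = Int.gcd b res := by
  by_cases h : res = 0
  · subst h
    rw [pvGcdLoop]
    simp [Int.gcd, Int.natAbs_of_nonneg hb.le]
  · rw [pvGcdLoop]
    simp only [h, dite_false]
    have hpos : 0 < res := lt_of_le_of_ne hres (Ne.symm h)
    have hmod : PySem.Int.mod b res = b % res := PySem.Int.mod_eq_emod_of_pos hpos
    have h0 : 0 ≤ b % res := Int.emod_nonneg b h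
    have h1 : b % res < res := Int.emod_lt_of_pos b hpos
    rw [hmod, pvGcdLoop_eq res (b % res) hpos h0, pv_gcd_step b res hb.le hpos]
termination_by res.natAbs
decreasing_by
  have hpos : 0 < res := lt_of_le_of_ne hres (Ne.symm h)
  have := Int.emod_nonneg b h
  have := Int.emod_lt_of_pos b hpos
  omega

-- extended-Euclid loop: first component is the gcd, second satisfies s*e ≡ gcd (mod m)
theorem pvExtLoop_spec (e m : Int) :
    ∀ fuel oldr r olds s, r.natAbs ≤ fuel → 0 < oldr → 0 ≤ r →
    m ∣ olds * e - oldr → m ∣ s * e - r →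
    (pvExtLoop oldr r olds s).1 = Int.gcd oldr r ∧
    m ∣ (pvExtLoop oldr r olds s).2 * e - (pvExtLoop oldr r olds s).1 := by
  intro fuel
  induction fuel with
  | zero =>
    intro oldr r olds s hf ho hr hd1 _
    have hr0 : r = 0 := by omega
    subst hr0
    rw [pvExtLoop]
    exact ⟨by simp [Int.gcd, Int.natAbs_of_nonneg ho.le], hd1⟩
  | succ n ih =>
    intro oldr r olds s hf ho hr hd1 hd2
    by_cases h : r = 0
    · subst h
      rw [pvExtLoop]
      exact ⟨by simp [Int.gcd, Int.natAbs_of_nonneg ho.le], hd1⟩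
    · rw [pvExtLoop]
      simp only [h, dite_false]
      have hpos : 0 < r := lt_of_le_of_ne hr (Ne.symm h)
      have hm : oldr - PySem.Int.floordiv oldr r * r = oldr % r := by
        have h1 := PySem.Int.floordiv_mul_add_mod oldr r
        have h2 : PySem.Int.mod oldr r = oldr % r := PySem.Int.mod_eq_emod_of_pos hpos
        omega
      have h0 : 0 ≤ oldr % r := Int.emod_nonneg oldr h
      have h1 : oldr % r < r := Int.emod_lt_of_pos oldr hpos
      have hrec := ih r (oldr - PySem.Int.floordiv oldr r * r) s
        (olds - PySem.Int.floordiv oldr r * s)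
        (by rw [hm]; omega) hpos (by rw [hm]; omega)
        hd2
        (by
          have hgoal : (olds - PySem.Int.floordiv oldr r * s) * e
              - (oldr - PySem.Int.floordiv oldr r * r)
              = (olds * e - oldr) - PySem.Int.floordiv oldr r * (s * e - r) := by ring
          rw [hgoal]
          exact dvd_sub hd1 (Dvd.dvd.mul_left hd2 _))
      refine ⟨?_, hrec.2⟩
      rw [hrec.1, hm, pv_gcd_step oldr r ho.le hpos]

-- fold keeping the last matching element: if nothing matches, the accumulator survives
theorem pv_foldl_keep_none (c : Int → Prop) [DecidablePred c] (l : List Int) (a : Int)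
    (h : ∀ i ∈ l, ¬ c i) :
    l.foldl (fun acc i => if c i then i else acc) a = a := by
  induction l generalizing a with
  | nil => rfl
  | cons x xs ih =>
    simp only [List.foldl_cons]
    rw [if_neg (h x List.mem_cons_self)]
    exact ih a (fun i hi => h i (List.mem_cons_of_mem _ hi))

-- fold keeping the last matching element, when d is the unique match in l
theorem pv_foldl_keep_unique (c : Int → Prop) [DecidablePred c] (l : List Int) (a d : Int)
    (hd : d ∈ l) (hc : c d) (huniq : ∀ i ∈ l, c i → i = d) :
    l.foldl (fun acc i => if c i then i else acc) a = d := by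
  induction l generalizing a with
  | nil => cases hd
  | cons x xs ih =>
    simp only [List.foldl_cons]
    by_cases hx : d ∈ xs
    · exact ih (if c x then x else a) hx (fun i hi hci => huniq i (List.mem_cons_of_mem _ hi) hci)
    · have hxd : x = d := by
        rcases List.mem_cons.mp hd with h | h
        · exact h.symm
        · exact absurd h hx
      subst hxd
      rw [if_pos hc]
      exact pv_foldl_keep_none c xs x
        (fun i hi hci => hx ((huniq i (List.mem_cons_of_mem _ hi) hci) ▸ hi))

-- per-candidate agreement: for 2 ≤ e < m the two loop bodies coincide
theorem pv_step_agree (m e : Int) (he2 : 2 ≤ e) (hem : e < m) :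
    ∀ acc : List (List Int),
    (if pvCheckRelativelyPrime e m then acc ++ [[e, pvModuleReverse e m]] else acc) =
    (match pvExtInverse e m with
     | none => acc
     | some d => acc ++ [[e, d]]) := by
  intro acc
  have hm0 : 0 < m := by omega
  have hgcdA : pvGcd e m = Int.gcd e m := by
    unfold pvGcd
    rw [if_neg (by omega)]
    simp only
    have hmode : PySem.Int.mod e m = e := by
      rw [PySem.Int.mod_eq_emod_of_pos hm0]
      exact Int.emod_eq_of_lt (by omega) hem
    rw [hmode, pvGcdLoop_eq m e hm0 (by omega), Int.gcd_comm]
  have hext := pvExtLoop_spec e m m.natAbs e m 1 0 (le_refl _) (by omega) (by omega)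
    (by simp) (by simp)
  by_cases hg : Int.gcd e m = 1
  · -- coprime: both sides append, and the two inverse values coincide
    have hA : pvCheckRelativelyPrime e m = true := by
      unfold pvCheckRelativelyPrime
      rw [if_pos (by rw [hgcdA, hg]; rfl)]
    have hg1 : (pvExtLoop e m 1 0).1 = 1 := by rw [hext.1, hg]; rfl
    have hB : pvExtInverse e m = some (PySem.Int.mod (pvExtLoop e m 1 0).2 m) := by
      unfold pvExtInverse
      simp only [hg1]
      rw [if_neg (by simp)]
    set s := (pvExtLoop e m 1 0).2 with hs
    set d := PySem.Int.mod s m with hdd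
    have hdvd : m ∣ s * e - 1 := by have := hext.2; rw [hg1] at this; exact this
    have hd0 : 0 ≤ d := PySem.Int.mod_nonneg s hm0
    have hdm : d < m := PySem.Int.mod_lt s hm0
    have hde : m ∣ d * e - 1 := by
      have hsd : m ∣ s - d := by
        rw [hdd, PySem.Int.mod_eq_emod_of_pos hm0, Int.emod_def]
        exact ⟨s / m, by ring⟩
      have hr : d * e - 1 = (s * e - 1) - (s - d) * e := by ring
      rw [hr]
      exact dvd_sub hdvd (Dvd.dvd.mul_right hsd e)
    have hcop : IsCoprime (e : Int) m := Int.isCoprime_iff_gcd_eq_one.mpr hg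
    have hd2 : 2 ≤ d := by
      rcases lt_trichotomy d 1 with h1 | h1 | h1
      · exfalso
        have hd00 : d = 0 := by omega
        rw [hd00] at hde
        have h2 : m ∣ (1:Int) := by simpa using (dvd_neg.mp (by simpa using hde))
        have := Int.le_of_dvd (by omega) h2
        omega
      · exfalso
        rw [h1, one_mul] at hde
        have h2 : e - 1 ≠ 0 := by omega
        have := Int.le_of_dvd (by omega) hde
        omega
      · omega
    have hMR : pvModuleReverse e m = d := by
      unfold pvModuleReverse
      refine pv_foldl_keep_unique (fun i => PySem.Int.mod (i * e) m = 1) _ 0 d ?_ ?_ ?_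
      · exact PySem.List.mem_pyRange_one.mpr ⟨by omega, hdm⟩
      · show PySem.Int.mod (d * e) m = 1
        rw [PySem.Int.mod_eq_emod_of_pos hm0]
        exact pv_emod_one_of_dvd (d * e) m hde (by omega)
      · intro i hi hci
        replace hci : PySem.Int.mod (i * e) m = 1 := hci
        have hib := PySem.List.mem_pyRange_one.mp hi
        rw [PySem.Int.mod_eq_emod_of_pos hm0] at hci
        have hie : m ∣ i * e - 1 := by
          have h2 : i * e ≡ 1 [ZMOD m] := by
            have h1m : (1:Int) % m = 1 := Int.emod_eq_of_lt (by omega) (by omega)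
            simpa [Int.ModEq, h1m] using hci
          have := Int.ModEq.dvd h2
          simpa using (dvd_neg.mpr this)
        have hdiff : m ∣ (i - d) * e := by
          have hr : (i - d) * e = (i * e - 1) - (d * e - 1) := by ring
          rw [hr]
          exact dvd_sub hie hde
        have hmd : m ∣ i - d := (hcop.symm).dvd_of_dvd_mul_right hdiff
        have : i - d = 0 := pv_dvd_small_zero _ m hmd (by omega) (by omega)
        omega
    simp only [hA, hB, if_true]
    rw [hMR]
  · -- not coprime: both sides skip
    have hA : pvCheckRelativelyPrime e m = false := by
      unfold pvCheckRelativelyPrime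
      rw [if_neg]
      rw [hgcdA]
      intro hc
      exact hg (by exact_mod_cast hc)
    have hg1 : (pvExtLoop e m 1 0).1 ≠ 1 := by
      rw [hext.1]
      intro hc
      exact hg (by exact_mod_cast hc)
    have hB : pvExtInverse e m = none := by
      unfold pvExtInverse
      rw [if_pos (by simpa using hg1)]
    rw [hB]
    simp [hA]

-- ===== VERDICT (by name: the statement is the Claim_ definition above) =====
theorem list_all_ed_spec : Claim_equal_list_all_ed := by
  intro p q _
  unfold Spec_list_all_ed list_all_ed list_all_ed_alt
  apply PySem.List.foldl_congr_mem
  intro acc e he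
  have hb := PySem.List.mem_pyRange_one.mp he
  exact pv_step_agree _ e hb.1 hb.2 acc
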